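-- pv_equiv track=rewrite | github.com/JasonW41k3r/Chinese-NER-BERT-Variants | code/spankl/spans.py | tags_to_spans
-- ===== SOURCE A (Python) =====
-- from typing import List, Tuple
--
-- def tags_to_spans(tags: List[str]) -> List[Tuple[int,int,str]]:
--     """
--     将连续且相同、且不为 'O' 的标签段合并为 span。
--     返回 (start_idx, end_idx_inclusive, label)
--     """
--     spans = []
--     n = len(tags)
--     i = 0
--     while i < n:
--         lab = tags[i]
--         if lab == "O":
--             i += 1
--             continue
--         j = i + 1
--         while j < n and tags[j] == lab:
--             j += 1
--         spans.append((i, j-1, lab))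
--         i = j
--     return spans
-- ===== SOURCE B (Python) =====
-- def tags_to_spans(tags):
--     """Single flat pass: maintain the start and label of the currently open span."""
--     spans = []
--     start = 0
--     cur = None
--     for i, t in enumerate(tags):
--         if cur is not None and t != cur:
--             spans.append((start, i - 1, cur))
--             cur = None
--         if t != "O" and cur is None:
--             start = i
--             cur = t
--     if cur is not None:
--         spans.append((start, len(tags) - 1, cur))
--     return spans
-- ===== Notes on version B (the rewrite author's own statement) =====
-- stated objective: simpler
-- what changed: Replaces A's nested while-loops (outer position loop plus inner run-scan with explicit index arithmetic) by one flat pass over enumerate that keeps the open span's start/label as running state and flushes it on change or at the end.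
import Mathlib
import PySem

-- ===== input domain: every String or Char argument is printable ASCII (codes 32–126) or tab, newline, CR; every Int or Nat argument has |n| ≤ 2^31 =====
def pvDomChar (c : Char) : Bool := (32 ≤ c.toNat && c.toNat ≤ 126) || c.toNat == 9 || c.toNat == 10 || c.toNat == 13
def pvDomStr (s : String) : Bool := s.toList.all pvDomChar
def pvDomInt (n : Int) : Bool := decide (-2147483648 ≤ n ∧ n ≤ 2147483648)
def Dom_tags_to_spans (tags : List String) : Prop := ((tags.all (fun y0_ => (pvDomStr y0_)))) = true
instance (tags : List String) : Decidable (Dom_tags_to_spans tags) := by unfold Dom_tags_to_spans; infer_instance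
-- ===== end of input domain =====

-- B replaces A's nested while-loops by one flat pass carrying the open span's start/label as state (simpler decomposition, same O(n) cost).


-- ===== PORT A =====
-- inner 'while j < n and tags[j] == lab: j += 1' : length of the run of lab at the front
def runLenA (lab : String) : List String → Nat
  | [] => 0
  | t :: rest => if t = lab then runLenA lab rest + 1 else 0

-- outer 'while i < n' loop of A, over the remaining tags with current index i
def goA (i : Int) : List String → List (Int × Int × String)
  | [] => []
  | lab :: rest =>
    if lab = "O" then goA (i + 1) rest
    else
      let k := runLenA lab rest
      (i, i + (k : Int), lab) :: goA (i + (k : Int) + 1) (rest.drop k)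
termination_by l => l.length
decreasing_by
  all_goals
    have h : (rest.drop (runLenA lab rest)).length = rest.length - runLenA lab rest :=
      List.length_drop
    simp only [List.length_cons]
    omega

def tags_to_spans (tags : List String) : List (Int × Int × String) := goA 0 tags

-- ===== PORT B =====
-- B's single for-loop over enumerate(tags); st = (start, cur) of the open span, or none;
-- the [] case is B's flush after the loop (there i = len tags, so i - 1 = len tags - 1)
def goB (i : Int) (st : Option (Int × String)) : List String → List (Int × Int × String)
  | [] =>
    match st with
    | some (s, cur) => [(s, i - 1, cur)]
    | none => []
  | t :: rest =>
    match st with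
    | some (s, cur) =>
      if t ≠ cur then
        (s, i - 1, cur) ::
          (if t ≠ "O" then goB (i + 1) (some (i, t)) rest else goB (i + 1) none rest)
      else goB (i + 1) (some (s, cur)) rest
    | none =>
      if t ≠ "O" then goB (i + 1) (some (i, t)) rest else goB (i + 1) none rest

def tags_to_spans_alt (tags : List String) : List (Int × Int × String) := goB 0 none tags

-- ===== PRECONDITION & SPEC =====
def Spec_tags_to_spans (tags : List String) (out : List (Int × Int × String)) : Prop := out = tags_to_spans_alt tags
instance (tags : List String) (out : List (Int × Int × String)) : Decidable (Spec_tags_to_spans tags out) := by unfold Spec_tags_to_spans; infer_instance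

-- ===== CLAIM (what is proved, stated in full; the proofs are below) =====
def Claim_equal_tags_to_spans : Prop := ∀ (tags : List String), Dom_tags_to_spans tags → Spec_tags_to_spans tags (tags_to_spans tags)

-- ===== LEMMAS AND PROOFS =====

theorem goA_nil (i : Int) : goA i [] = [] := by rw [goA]

theorem goA_cons (i : Int) (t : String) (rest : List String) :
    goA i (t :: rest) =
      if t = "O" then goA (i + 1) rest
      else (i, i + (runLenA t rest : Int), t) ::
        goA (i + (runLenA t rest : Int) + 1) (rest.drop (runLenA t rest)) := by
  rw [goA]

-- while a span (s, cur) is open, B emits it at the end of cur's run and resumes closed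
theorem goB_open (l : List String) (cur : String) (s i : Int) :
    goB i (some (s, cur)) l =
      (s, i + (runLenA cur l : Int) - 1, cur) ::
        goB (i + (runLenA cur l : Int)) none (l.drop (runLenA cur l)) := by
  induction l generalizing i with
  | nil => simp [goB, runLenA]
  | cons t rest ih =>
    by_cases h : t = cur
    · subst h
      rw [show goB i (some (s, t)) (t :: rest) = goB (i + 1) (some (s, t)) rest from by
        simp [goB]]
      rw [ih (i + 1)]
      rw [show runLenA t (t :: rest) = runLenA t rest + 1 from by simp [runLenA]]
      rw [List.drop_succ_cons]
      have e1 : i + 1 + (runLenA t rest : Int) - 1 = i + ((runLenA t rest + 1 : Nat) : Int) - 1 := by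
        push_cast; ring
      have e2 : i + 1 + (runLenA t rest : Int) = i + ((runLenA t rest + 1 : Nat) : Int) := by
        push_cast; ring
      rw [e2]
    · rw [show runLenA cur (t :: rest) = 0 from by simp [runLenA, h]]
      simp [goB, h]

theorem goA_eq_goB (n : Nat) (l : List String) (i : Int) (hn : l.length ≤ n) :
    goA i l = goB i none l := by
  induction n generalizing l i with
  | zero =>
    have : l = [] := List.eq_nil_of_length_eq_zero (Nat.le_zero.mp hn)
    subst this; simp [goA_nil, goB]
  | succ m ih =>
    cases l with
    | nil => simp [goA_nil, goB]
    | cons t rest =>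
      have hr : rest.length ≤ m := by simp at hn; omega
      by_cases h : t = "O"
      · subst h
        rw [goA_cons, if_pos rfl]
        rw [show goB i none ("O" :: rest) = goB (i + 1) none rest from by simp [goB]]
        exact ih rest (i + 1) hr
      · rw [show goB i none (t :: rest) = goB (i + 1) (some (i, t)) rest from by
          simp [goB, h]]
        rw [goB_open, goA_cons, if_neg h]
        have hlen : (rest.drop (runLenA t rest)).length ≤ m := by
          have : (rest.drop (runLenA t rest)).length = rest.length - runLenA t rest :=
            List.length_drop
          omega
        rw [ih _ _ hlen]
        have e1 : i + (runLenA t rest : Int) = i + 1 + (runLenA t rest : Int) - 1 := by ring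
        have e2 : i + (runLenA t rest : Int) + 1 = i + 1 + (runLenA t rest : Int) := by ring
        rw [e2, e1]

-- ===== VERDICT (by name: the statement is the Claim_ definition above) =====
theorem tags_to_spans_spec : Claim_equal_tags_to_spans := by
  intro tags _
  unfold Spec_tags_to_spans tags_to_spans tags_to_spans_alt
  exact goA_eq_goB tags.length tags 0 le_rfl
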